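-- pv_equiv track=rewrite | github.com/green-elaia/problem-solving | 전화번호목록.py | solution
-- ===== SOURCE A (Python) =====
-- def solution(phone_book):
--     answer = True
--     d = dict()
--     for i, x in enumerate(phone_book):
--         l = len(x)
--         tmp = [k[:l] for k in phone_book][i+1:]
--         if x in tmp:
--             d[x] = d.get(x, 0) + 1
--     for x in d:
--         if d[x]:
--             answer = False
--     return answer
-- ===== SOURCE B (Python) =====
-- def solution(phone_book):
--     seen = set()
--     for y in phone_book:
--         for m in range(len(y) + 1):
--             if y[:m] in seen:
--                 return False
--         seen.add(y)
--     return True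
-- ===== Notes on version B (the rewrite author's own statement) =====
-- stated objective: faster
-- what changed: Instead of re-slicing the whole list for every element (quadratic in list length), B keeps a set of the numbers seen so far and checks each number's prefixes against it in one pass.
import Mathlib
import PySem

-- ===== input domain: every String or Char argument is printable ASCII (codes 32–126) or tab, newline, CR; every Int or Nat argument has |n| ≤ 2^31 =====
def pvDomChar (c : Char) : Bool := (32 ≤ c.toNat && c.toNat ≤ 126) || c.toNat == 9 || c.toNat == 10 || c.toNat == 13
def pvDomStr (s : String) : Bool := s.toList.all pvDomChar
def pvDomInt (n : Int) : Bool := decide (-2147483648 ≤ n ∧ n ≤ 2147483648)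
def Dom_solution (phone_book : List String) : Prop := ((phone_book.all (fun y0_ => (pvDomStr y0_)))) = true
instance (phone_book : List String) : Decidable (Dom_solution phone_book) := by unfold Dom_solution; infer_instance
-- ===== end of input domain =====

-- B replaces A's per-element rescan of the whole list (rebuilding all truncations for every
-- element) by a single pass that keeps a set of the numbers seen so far and checks each
-- number's prefixes against it; objective: faster (asymptotic in the list length).

-- ===== PORT A =====
-- literal port of A: first loop counts, per x, whether x occurs among the later elements
-- truncated to len(x); second loop sets answer to False for any key with a truthy (≠ 0) count.
def solution (phone_book : List String) : Bool :=
  let d : PySem.Dict String Int :=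
    (PySem.List.enumerate phone_book 0).foldl
      (fun d p =>
        let i := p.1
        let x := p.2
        let l := PySem.Str.len x
        let tmp := PySem.List.slice (phone_book.map (fun k => PySem.Str.slice k none (some l))) (some (i + 1)) none
        if tmp.contains x then d.insert x (d.getD x 0 + 1) else d)
      PySem.Dict.empty
  d.keys.foldl (fun answer x => if (d.getD x 0) != 0 then false else answer) true

-- ===== PORT B =====
-- one pass: for each number y, test every prefix of y (including y itself) against the set of
-- numbers already seen; 'return False' becomes the recursion stopping with false.
def solutionAltGo (seen : PySem.Set String) : List String → Bool
  | [] => true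
  | y :: rest =>
    if (PySem.List.pyRange 0 (PySem.Str.len y + 1) 1).any
        (fun m => PySem.Set.contains seen (PySem.Str.slice y none (some m)))
    then false
    else solutionAltGo (PySem.Set.add seen y) rest

def solution_alt (phone_book : List String) : Bool :=
  solutionAltGo PySem.Set.empty phone_book

-- ===== PRECONDITION & SPEC =====
def Spec_solution (phone_book : List String) (out : Bool) : Prop := out = solution_alt phone_book
instance (phone_book : List String) (out : Bool) : Decidable (Spec_solution phone_book out) := by unfold Spec_solution; infer_instance

-- ===== CLAIM (what is proved, stated in full; the proofs are below) =====
def Claim_equal_solution : Prop := ∀ (phone_book : List String), Dom_solution phone_book → Spec_solution phone_book (solution phone_book)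

-- ===== LEMMAS AND PROOFS =====

-- x is a (possibly improper) prefix of y
def prefixB (x y : String) : Bool := x.toList.isPrefixOf y.toList

-- some element of the list is a prefix of a LATER element
def anyPrefPair : List String → Bool
  | [] => false
  | y :: rest => rest.any (fun k => prefixB y k) || anyPrefPair rest

-- B's accumulator-style specification: some already-seen (pre) element is a prefix of an
-- element of l, or some element of l is a prefix of a later element of l
def badB : List String → List String → Bool
  | _, [] => false
  | pre, y :: rest => pre.any (fun x => prefixB x y) || badB (pre ++ [y]) rest

lemma take_eq_iff_prefix (x k : String) :
    (PySem.Str.slice k none (some (PySem.Str.len x)) == x) = prefixB x k := by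
  rw [Bool.eq_iff_iff, beq_iff_eq, prefixB, List.isPrefixOf_iff_prefix,
    List.prefix_iff_eq_take]
  constructor
  · intro h
    rw [← h]
    simp [PySem.Str.len_eq, PySem.List.slice_to_natCast]
  · intro h
    have : (PySem.Str.slice k none (some (PySem.Str.len x))).toList = x.toList := by
      simp [PySem.Str.len_eq, PySem.List.slice_to_natCast]
      exact h.symm
    exact String.toList_inj.mp this

lemma cond_eq (full : List String) (s : Nat) (x : String) :
    (PySem.List.slice (full.map (fun k => PySem.Str.slice k none (some (PySem.Str.len x))))
        (some ((s + 1 : Nat) : Int)) none).contains x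
      = (full.drop (s + 1)).any (fun k => prefixB x k) := by
  rw [PySem.List.slice_from_natCast, ← List.map_drop]
  rw [Bool.eq_iff_iff, List.contains_eq_mem, decide_eq_true_iff, List.mem_map,
    List.any_eq_true]
  constructor
  · rintro ⟨k, hk, he⟩
    exact ⟨k, hk, by rw [← take_eq_iff_prefix, he, beq_self_eq_true]⟩
  · rintro ⟨k, hk, hp⟩
    exact ⟨k, hk, by rw [← take_eq_iff_prefix] at hp; exact beq_iff_eq.mp hp⟩

lemma enum_any_eq (full : List String) :
    ∀ (l : List String) (s : Nat), full.drop s = l →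
    ((PySem.List.enumerate l (s : Int)).any (fun p =>
        (PySem.List.slice (full.map (fun k => PySem.Str.slice k none (some (PySem.Str.len p.2))))
          (some (p.1 + 1)) none).contains p.2))
      = anyPrefPair l := by
  intro l
  induction l with
  | nil => intro s _; simp [PySem.List.enumerate, anyPrefPair]
  | cons y rest ih =>
    intro s hs
    have hdrop : full.drop (s + 1) = rest := by
      have := congrArg (List.drop 1) hs
      simpa [List.drop_drop, Nat.add_comm] using this
    rw [PySem.List.enumerate_cons, List.any_cons]
    have h1 : ((s : Int) + 1) = ((s + 1 : Nat) : Int) := by push_cast; ring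
    rw [h1, ih (s + 1) hdrop]
    simp only [anyPrefPair]
    congr 1
    rw [cond_eq full s y, hdrop]

-- A returns True iff no element is a prefix of a later element
lemma dict_loop (L : List (Int × String)) (cond : Int × String → Bool) :
    ((L.foldl (fun d p => if cond p then d.insert p.2 (d.getD p.2 0 + 1) else d)
        (PySem.Dict.empty : PySem.Dict String Int)).keys.any (fun x =>
      (L.foldl (fun d p => if cond p then d.insert p.2 (d.getD p.2 0 + 1) else d)
        (PySem.Dict.empty : PySem.Dict String Int)).getD x 0 != 0)) = L.any cond := by
  rw [PySem.List.foldl_if_eq_foldl_filter]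
  set F := L.filter cond with hF
  set M := F.map (fun p => p.2) with hM
  have hfold : F.foldl (fun d (p : Int × String) => d.insert p.2 (d.getD p.2 0 + 1))
      (PySem.Dict.empty : PySem.Dict String Int)
      = M.foldl (fun d x => d.insert x (d.getD x 0 + 1)) PySem.Dict.empty := by
    rw [hM, List.foldl_map]
  rw [hfold]
  set d := M.foldl (fun d x => d.insert x (d.getD x 0 + 1)) (PySem.Dict.empty : PySem.Dict String Int) with hd
  have hkeys : d.keys = PySem.Set.ofList M := by
    rw [hd, PySem.Dict.keys_foldl_insert, PySem.Dict.keys_empty]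
    rfl
  have hgetD : ∀ v, d.getD v 0 = (M.count v : Int) := by
    intro v
    rw [hd, PySem.Dict.getD_foldl_insert_add_one, PySem.Dict.getD_empty, zero_add]
  rw [Bool.eq_iff_iff, List.any_eq_true, List.any_eq_true]
  constructor
  · rintro ⟨x, hx, _⟩
    rw [hkeys, PySem.Set.mem_ofList, hM, List.mem_map] at hx
    obtain ⟨p, hpF, rfl⟩ := hx
    rw [hF, List.mem_filter] at hpF
    exact ⟨p, hpF.1, hpF.2⟩
  · rintro ⟨p, hp, hcp⟩
    have hpF : p ∈ F := by rw [hF, List.mem_filter]; exact ⟨hp, hcp⟩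
    have hxM : p.2 ∈ M := by rw [hM, List.mem_map]; exact ⟨p, hpF, rfl⟩
    refine ⟨p.2, ?_, ?_⟩
    · rw [hkeys, PySem.Set.mem_ofList]; exact hxM
    · rw [bne_iff_ne, hgetD]
      have := List.count_pos_iff.mpr hxM
      omega

-- A returns True iff no element is a prefix of a later element
lemma solution_eq (phone_book : List String) :
    solution phone_book = !anyPrefPair phone_book := by
  simp only [solution]
  rw [PySem.List.foldl_if_false_eq, Bool.true_and, dict_loop]
  have h := enum_any_eq phone_book phone_book 0 rfl
  rw [Nat.cast_zero] at h
  rw [h]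

lemma badB_append_any (l : List α) (f g : α → Bool) :
    l.any (fun x => f x || g x) = (l.any f || l.any g) := by
  induction l with
  | nil => rfl
  | cons y rest ih => simp only [List.any_cons, ih]; cases f y <;> cases g y <;> simp

lemma badB_eq : ∀ (l pre : List String),
    badB pre l = (l.any (fun y => pre.any (fun x => prefixB x y)) || anyPrefPair l) := by
  intro l
  induction l with
  | nil => intro pre; simp [badB, anyPrefPair]
  | cons y rest ih =>
    intro pre
    rw [badB, ih (pre ++ [y])]
    simp only [anyPrefPair, List.any_cons]
    have : (fun z => (pre ++ [y]).any (fun x => prefixB x z))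
        = fun z => (pre.any (fun x => prefixB x z) || prefixB y z) := by
      funext z; simp [List.any_append]
    rw [this, badB_append_any rest]
    cases pre.any (fun x => prefixB x y) <;>
      cases rest.any (fun z => pre.any fun x => prefixB x z) <;>
      cases rest.any (fun z => prefixB y z) <;> simp

lemma inner_eq (pre : List String) (y : String) :
    ((PySem.List.pyRange 0 (PySem.Str.len y + 1) 1).any
        (fun m => PySem.Set.contains (PySem.Set.ofList pre) (PySem.Str.slice y none (some m))))
      = pre.any (fun x => prefixB x y) := by
  rw [Bool.eq_iff_iff, List.any_eq_true, List.any_eq_true]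
  constructor
  · rintro ⟨m, hm, hc⟩
    rw [PySem.List.mem_pyRange_one] at hm
    obtain ⟨hm0, hm1⟩ := hm
    have hmem : (PySem.Str.slice y none (some m)) ∈ pre := by
      rw [PySem.Set.contains_iff _ _, PySem.Set.mem_ofList] at hc
      exact hc
    refine ⟨_, hmem, ?_⟩
    rw [prefixB, List.isPrefixOf_iff_prefix]
    simp only [PySem.Str.toList_slice, PySem.Chars.slice_eq_listSlice, PySem.List.slice_to _ hm0]
    exact List.take_prefix _ _
  · rintro ⟨x, hx, hp⟩
    refine ⟨(x.toList.length : Int), ?_, ?_⟩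
    · rw [PySem.List.mem_pyRange_one]
      have hle : x.toList.length ≤ y.toList.length :=
        (List.isPrefixOf_iff_prefix.mp hp).length_le
      rw [PySem.Str.len_eq]
      omega
    · have hsl : PySem.Str.slice y none (some (x.toList.length : Int)) = x := by
        apply String.toList_inj.mp
        simp only [PySem.Str.toList_slice, PySem.Chars.slice_eq_listSlice,
          PySem.List.slice_to_natCast]
        exact (List.prefix_iff_eq_take.mp (List.isPrefixOf_iff_prefix.mp hp)).symm
      rw [hsl, PySem.Set.contains_iff _ _, PySem.Set.mem_ofList]
      exact hx

lemma altGo_eq : ∀ (l pre : List String),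
    solutionAltGo (PySem.Set.ofList pre) l = !badB pre l := by
  intro l
  induction l with
  | nil => intro pre; simp [solutionAltGo, badB]
  | cons y rest ih =>
    intro pre
    rw [solutionAltGo, inner_eq pre y]
    have hadd : PySem.Set.add (PySem.Set.ofList pre) y = PySem.Set.ofList (pre ++ [y]) := by
      rw [PySem.Set.ofList_eq_foldl, PySem.Set.ofList_eq_foldl, List.foldl_append]
      rfl
    rw [hadd, badB]
    cases pre.any (fun x => prefixB x y) <;> simp [ih (pre ++ [y])]

lemma solution_alt_eq (phone_book : List String) :
    solution_alt phone_book = !anyPrefPair phone_book := by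
  have h : PySem.Set.empty = PySem.Set.ofList ([] : List String) := rfl
  rw [solution_alt, h, altGo_eq, badB_eq]
  simp

-- ===== VERDICT (by name: the statement is the Claim_ definition above) =====
theorem solution_spec : Claim_equal_solution := by
  intro phone_book _
  unfold Spec_solution
  rw [solution_eq, solution_alt_eq]
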